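-- pv_equiv track=rewrite | github.com/lewis6991/tcl-ls | skills/commit-messages/scripts/check_commit_message.py | _has_conventional_commit_header
-- ===== SOURCE A (Python) =====
-- _ALLOWED_TYPES = ('feat', 'fix', 'perf', 'docs', 'refactor', 'test', 'chore', 'ci')
--
-- def _has_conventional_commit_header(subject: str) -> bool:
--     for commit_type in _ALLOWED_TYPES:
--         prefix = f'{commit_type}: '
--         if subject.startswith(prefix) and subject[len(prefix) :].strip():
--             return True
--
--         scope_prefix = f'{commit_type}('
--         if not subject.startswith(scope_prefix):
--             continue
--         closing = subject.find('): ')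
--         bang_closing = subject.find(')!: ')
--         if closing != -1 and subject[closing + 3 :].strip():
--             return True
--         if bang_closing != -1 and subject[bang_closing + 4 :].strip():
--             return True
--
--     return False
-- ===== SOURCE B (Python) =====
-- _ALLOWED_TYPES = ('feat', 'fix', 'perf', 'docs', 'refactor', 'test', 'chore', 'ci')
--
--
-- def _has_conventional_commit_header(subject: str) -> bool:
--     ctype = next((t for t in _ALLOWED_TYPES if subject.startswith(t)), None)
--     if ctype is None:
--         return False
--     rest = subject[len(ctype):]
--     if rest.startswith(': '):
--         return bool(rest[2:].strip())
--     if not rest.startswith('('):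
--         return False
--     # single left-to-right scan for the earliest scope terminator '): ' or ')!: '
--     tail = subject
--     while tail:
--         if tail[0] == ')':
--             if tail[1:3] == ': ':
--                 return bool(tail[3:].strip())
--             if tail[1:4] == '!: ':
--                 return bool(tail[4:].strip())
--         tail = tail[1:]
--     return False
-- ===== Notes on version B (the rewrite author's own statement) =====
-- stated objective: alternative
-- what changed: A tries all 8 commit types, re-testing prefixes and running two independent substring-search passes per matching type; B locates the single matching type once (no type is a prefix of another) and then does one left-to-right scan that stops at the earliest scope terminator, plain or bang.
import Mathlib
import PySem

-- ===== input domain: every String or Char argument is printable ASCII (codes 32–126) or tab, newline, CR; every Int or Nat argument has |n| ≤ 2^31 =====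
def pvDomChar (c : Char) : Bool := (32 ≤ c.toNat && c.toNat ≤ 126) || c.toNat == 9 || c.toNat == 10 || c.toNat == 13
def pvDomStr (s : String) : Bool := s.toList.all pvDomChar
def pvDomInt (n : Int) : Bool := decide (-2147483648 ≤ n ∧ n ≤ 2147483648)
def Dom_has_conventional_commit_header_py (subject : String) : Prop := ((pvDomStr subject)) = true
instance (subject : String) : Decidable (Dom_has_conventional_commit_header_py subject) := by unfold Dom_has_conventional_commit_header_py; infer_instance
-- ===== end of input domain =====

-- B replaces A's per-type prefix loop with a single first-matching-type lookup followed by one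
-- left-to-right scan for the earliest scope terminator ('): ' or ')!: '); objective: alternative.


-- ===== PORT A =====
-- _ALLOWED_TYPES
def pvAllowedTypes : List String := ["feat", "fix", "perf", "docs", "refactor", "test", "chore", "ci"]

-- A's for-loop over _ALLOWED_TYPES; one recursive step per commit_type, fall-through = next iteration
def pvLoopA : List String → String → Bool
  | [], _ => false
  | t :: ts, subject =>
    let pre := t ++ ": "
    if PySem.Str.startswith subject pre
        && !(PySem.Str.strip (PySem.Str.slice subject (some (PySem.Str.len pre)) none) == "") then
      true
    else if !(PySem.Str.startswith subject (t ++ "(")) then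
      pvLoopA ts subject
    else
      let closing := PySem.Str.find subject "): "
      let bang := PySem.Str.find subject ")!: "
      if closing != -1
          && !(PySem.Str.strip (PySem.Str.slice subject (some (closing + 3)) none) == "") then
        true
      else if bang != -1
          && !(PySem.Str.strip (PySem.Str.slice subject (some (bang + 4)) none) == "") then
        true
      else
        pvLoopA ts subject

def has_conventional_commit_header_py (subject : String) : Bool :=
  pvLoopA pvAllowedTypes subject

-- ===== PORT B =====
-- next((t for t in _ALLOWED_TYPES if subject.startswith(t)), None)
def pvFindType : List String → String → Option String
  | [], _ => none
  | t :: ts, subject => if PySem.Str.startswith subject t then some t else pvFindType ts subject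

-- B's while-loop: tail runs over the successive suffixes of subject (a str = its List Char)
def pvScanB : List Char → Bool
  | [] => false
  | c :: cs =>
    if c == ')' && cs.take 2 == [':', ' '] then !(PySem.Chars.strip (cs.drop 2) == [])
    else if c == ')' && cs.take 3 == ['!', ':', ' '] then !(PySem.Chars.strip (cs.drop 3) == [])
    else pvScanB cs

def has_conventional_commit_header_py_alt (subject : String) : Bool :=
  match pvFindType pvAllowedTypes subject with
  | none => false
  | some t =>
    let rest := PySem.Str.slice subject (some (PySem.Str.len t)) none
    if PySem.Str.startswith rest ": " then
      !(PySem.Str.strip (PySem.Str.slice rest (some 2) none) == "")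
    else if PySem.Str.startswith rest "(" then
      pvScanB subject.toList
    else
      false

-- ===== PRECONDITION & SPEC =====
def Spec_has_conventional_commit_header_py (subject : String) (out : Bool) : Prop := out = has_conventional_commit_header_py_alt subject
instance (subject : String) (out : Bool) : Decidable (Spec_has_conventional_commit_header_py subject out) := by unfold Spec_has_conventional_commit_header_py; infer_instance

-- ===== CLAIM (what is proved, stated in full; the proofs are below) =====
def Claim_equal_has_conventional_commit_header_py : Prop := ∀ (subject : String), Dom_has_conventional_commit_header_py subject → Spec_has_conventional_commit_header_py subject (has_conventional_commit_header_py subject)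

-- ===== LEMMAS AND PROOFS =====

-- "some character of l is not whitespace" (= truthiness of l.strip())
def pvNS (l : List Char) : Prop := ∃ c ∈ l, ¬ PySem.Chars.isspace c = true

def pvSep1 : List Char := [')', ':', ' ']
def pvSep2 : List Char := [')', '!', ':', ' ']

-- "some occurrence of a scope terminator is followed by a non-space character"
def pvSW (l : List Char) : Prop :=
  ∃ k, (pvSep1 <+: l.drop k ∧ pvNS (l.drop (k + 3))) ∨ (pvSep2 <+: l.drop k ∧ pvNS (l.drop (k + 4)))

lemma pv_strip_eq_nil_iff (l : List Char) :
    PySem.Chars.strip l = [] ↔ ∀ c ∈ l, PySem.Chars.isspace c = true := by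
  unfold PySem.Chars.strip PySem.Chars.rstrip PySem.Chars.lstrip
  constructor
  · intro h c hc
    rw [← List.takeWhile_append_dropWhile (p := PySem.Chars.isspace) (l := l)] at hc
    rcases List.mem_append.mp hc with h1 | h2
    · exact List.mem_takeWhile_imp h1
    · have h' := List.dropWhile_eq_nil_iff.mp (List.reverse_eq_nil_iff.mp h)
      exact h' c (List.mem_reverse.mpr h2)
  · intro h
    rw [List.dropWhile_eq_nil_iff.mpr (fun x hx => h x hx)]
    simp

lemma pv_strip_bool (l : List Char) : (!(PySem.Chars.strip l == [])) = true ↔ pvNS l := by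
  rw [Bool.not_eq_eq_eq_not, Bool.not_true, beq_eq_false_iff_ne]
  unfold pvNS
  rw [ne_eq, pv_strip_eq_nil_iff]
  push Not
  rfl

lemma pvNS_mono {l : List Char} {m n : Nat} (h : m ≤ n) (hn : pvNS (l.drop n)) : pvNS (l.drop m) := by
  obtain ⟨c, hc, hcs⟩ := hn
  refine ⟨c, ?_, hcs⟩
  have : l.drop n = (l.drop m).drop (n - m) := by rw [List.drop_drop]; congr 1; omega
  rw [this] at hc
  exact List.mem_of_mem_drop hc

lemma pvSW_cons (c : Char) (cs : List Char) :
    pvSW (c :: cs) ↔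
      (pvSep1 <+: (c :: cs) ∧ pvNS (cs.drop 2)) ∨ (pvSep2 <+: (c :: cs) ∧ pvNS (cs.drop 3)) ∨ pvSW cs := by
  constructor
  · rintro ⟨k, hk⟩
    cases k with
    | zero => simp only [List.drop_zero] at hk
              rcases hk with ⟨h1, h2⟩ | ⟨h1, h2⟩
              · exact Or.inl ⟨h1, by simpa using h2⟩
              · exact Or.inr (Or.inl ⟨h1, by simpa using h2⟩)
    | succ k =>
        refine Or.inr (Or.inr ⟨k, ?_⟩)
        have e1 : k + 1 + 3 = (k + 3) + 1 := by omega
        have e2 : k + 1 + 4 = (k + 4) + 1 := by omega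
        rw [e1, e2, List.drop_succ_cons, List.drop_succ_cons, List.drop_succ_cons] at hk
        exact hk
  · rintro (⟨h1, h2⟩ | ⟨h1, h2⟩ | ⟨k, hk⟩)
    · exact ⟨0, Or.inl ⟨by simpa using h1, by simpa using h2⟩⟩
    · exact ⟨0, Or.inr ⟨by simpa using h1, by simpa using h2⟩⟩
    · refine ⟨k + 1, ?_⟩
      have e1 : k + 1 + 3 = (k + 3) + 1 := by omega
      have e2 : k + 1 + 4 = (k + 4) + 1 := by omega
      rw [e1, e2, List.drop_succ_cons, List.drop_succ_cons, List.drop_succ_cons]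
      exact hk

lemma pv_scan_iff (l : List Char) : pvScanB l = true ↔ pvSW l := by
  induction l with
  | nil => simp [pvScanB, pvSW, pvSep1, pvSep2, pvNS]
  | cons c cs ih =>
    rw [pvSW_cons]
    by_cases h1 : (c == ')' && cs.take 2 == [':', ' ']) = true
    · obtain ⟨hc, ht⟩ := Bool.and_eq_true_iff.mp h1
      have hc' : c = ')' := by simpa using hc
      have ht' : cs.take 2 = [':', ' '] := by simpa using ht
      obtain ⟨rest, hrest⟩ : ∃ rest, cs = ':' :: ' ' :: rest := by
        cases cs with
        | nil => simp at ht'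
        | cons a as =>
          cases as with
          | nil => simp at ht'
          | cons b bs =>
            simp at ht'
            exact ⟨bs, by simp [ht'.1, ht'.2]⟩
      rw [pvScanB]
      simp only [h1, if_pos]
      rw [pv_strip_bool]
      constructor
      · intro hns
        exact Or.inl ⟨by simp [pvSep1, hc', hrest], hns⟩
      · rintro (⟨_, h2⟩ | ⟨hp, _⟩ | ⟨k, hk⟩)
        · exact h2
        · exfalso
          rw [hrest] at hp
          simp [pvSep2, List.cons_prefix_cons] at hp
        · rcases hk with ⟨_, h2⟩ | ⟨_, h2⟩
          · exact pvNS_mono (m := 2) (n := k + 3) (by omega) h2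
          · exact pvNS_mono (m := 2) (n := k + 4) (by omega) h2
    · by_cases h2 : (c == ')' && cs.take 3 == ['!', ':', ' ']) = true
      · obtain ⟨hc, ht⟩ := Bool.and_eq_true_iff.mp h2
        have hc' : c = ')' := by simpa using hc
        have ht' : cs.take 3 = ['!', ':', ' '] := by simpa using ht
        obtain ⟨rest, hrest⟩ : ∃ rest, cs = '!' :: ':' :: ' ' :: rest := by
          cases cs with
          | nil => simp at ht'
          | cons a as =>
            cases as with
            | nil => simp at ht'
            | cons b bs =>
              cases bs with
              | nil => simp at ht'
              | cons d ds =>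
                simp at ht'
                exact ⟨ds, by simp [ht'.1, ht'.2.1, ht'.2.2]⟩
        rw [pvScanB]
        simp only [h1, h2, if_neg, if_pos, Bool.not_eq_true]
        rw [pv_strip_bool]
        constructor
        · intro hns
          exact Or.inr (Or.inl ⟨by simp [pvSep2, hc', hrest], hns⟩)
        · rintro (⟨hp, _⟩ | ⟨_, hns⟩ | ⟨k, hk⟩)
          · exfalso
            rw [hrest] at hp
            simp [pvSep1, List.cons_prefix_cons] at hp
          · exact hns
          · rcases hk with ⟨_, hns⟩ | ⟨_, hns⟩
            · exact pvNS_mono (m := 3) (n := k + 3) (by omega) hns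
            · exact pvNS_mono (m := 3) (n := k + 4) (by omega) hns
      · rw [pvScanB]
        simp only [h1, h2, if_neg, Bool.not_eq_true]
        rw [ih]
        constructor
        · intro h; exact Or.inr (Or.inr h)
        · rintro (⟨hp, _⟩ | ⟨hp, _⟩ | h)
          · exfalso
            obtain ⟨tl, htl⟩ := hp
            simp only [pvSep1, List.cons_append, List.cons.injEq] at htl
            exact h1 (by simp [← htl.1, ← htl.2])
          · exfalso
            obtain ⟨tl, htl⟩ := hp
            simp only [pvSep2, List.cons_append, List.cons.injEq] at htl
            exact h2 (by simp [← htl.1, ← htl.2])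
          · exact h

lemma pv_find_case (l p : List Char) (j : Nat) :
    (PySem.Chars.find l p ≠ -1 ∧ pvNS (l.drop ((PySem.Chars.find l p).toNat + j)))
      ↔ ∃ k, p <+: l.drop k ∧ pvNS (l.drop (k + j)) := by
  constructor
  · rintro ⟨hne, hns⟩
    have h0 : 0 ≤ PySem.Chars.find l p := by
      have := PySem.Chars.neg_one_le_find l p
      omega
    exact ⟨(PySem.Chars.find l p).toNat, (PySem.Chars.find_spec h0).1, hns⟩
  · rintro ⟨k, hk, hns⟩
    have hin : PySem.Chars.isIn p l = true :=
      (PySem.Chars.exists_prefix_drop_iff_isIn p l).mp ⟨k, hk⟩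
    have hne : PySem.Chars.find l p ≠ -1 :=
      (PySem.Chars.find_ne_neg_one_iff l p).mpr ((PySem.Chars.isIn_iff_infix p l).mp hin)
    have h0 : 0 ≤ PySem.Chars.find l p := by
      have := PySem.Chars.neg_one_le_find l p
      omega
    have hle : (PySem.Chars.find l p).toNat ≤ k := by
      by_contra hlt
      exact (PySem.Chars.find_spec h0).2 k (by omega) hk
    exact ⟨hne, pvNS_mono (by omega) hns⟩

-- the body of one iteration of A's loop (no fall-through)
def pvBody (t subject : String) : Bool :=
  (PySem.Str.startswith subject (t ++ ": ")
      && !(PySem.Str.strip (PySem.Str.slice subject (some (PySem.Str.len (t ++ ": "))) none) == ""))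
  || (PySem.Str.startswith subject (t ++ "(")
      && ((PySem.Str.find subject "): " != -1
            && !(PySem.Str.strip (PySem.Str.slice subject (some (PySem.Str.find subject "): " + 3)) none) == ""))
          || (PySem.Str.find subject ")!: " != -1
            && !(PySem.Str.strip (PySem.Str.slice subject (some (PySem.Str.find subject ")!: " + 4)) none) == ""))))

lemma pvLoopA_cons (t : String) (ts : List String) (s : String) :
    pvLoopA (t :: ts) s = (pvBody t s || pvLoopA ts s) := by
  simp only [pvLoopA, pvBody]
  split_ifs <;> simp_all

lemma pvLoopA_eq_any (ts : List String) (s : String) :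
    pvLoopA ts s = ts.any (fun t => pvBody t s) := by
  induction ts with
  | nil => rfl
  | cons t ts ih => rw [pvLoopA_cons, ih, List.any_cons]

lemma pv_sw_append (s t u : String) (h : PySem.Str.startswith s (t ++ u) = true) :
    PySem.Str.startswith s t = true := by
  rw [PySem.Str.startswith_eq, PySem.Chars.startswith_iff] at h ⊢
  rw [String.toList_append] at h
  exact (List.prefix_append t.toList u.toList).trans h

lemma pvBody_false (t s : String) (h : PySem.Str.startswith s t = false) : pvBody t s = false := by
  have h1 : PySem.Str.startswith s (t ++ ": ") = false := by
    cases hx : PySem.Str.startswith s (t ++ ": ") with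
    | false => rfl
    | true =>
      have hc := pv_sw_append s t ": " hx
      rw [h] at hc
      exact hc.symm
  have h2 : PySem.Str.startswith s (t ++ "(") = false := by
    cases hx : PySem.Str.startswith s (t ++ "(") with
    | false => rfl
    | true =>
      have hc := pv_sw_append s t "(" hx
      rw [h] at hc
      exact hc.symm
  unfold pvBody
  rw [h1, h2]
  simp only [Bool.false_and, Bool.or_self]

lemma pvFindType_none (ts : List String) (s : String) (h : pvFindType ts s = none) :
    ∀ t ∈ ts, PySem.Str.startswith s t = false := by
  induction ts with
  | nil => simp
  | cons t ts ih =>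
    rw [pvFindType] at h
    by_cases hsw : PySem.Str.startswith s t = true
    · rw [if_pos hsw] at h
      exact absurd h (by simp)
    · rw [if_neg hsw] at h
      intro u hu
      rcases List.mem_cons.mp hu with rfl | hmem
      · exact Bool.eq_false_iff.mpr hsw
      · exact ih h u hmem

lemma pvFindType_some (ts : List String) (s : String) (t : String) (h : pvFindType ts s = some t) :
    t ∈ ts ∧ PySem.Str.startswith s t = true := by
  induction ts with
  | nil => simp [pvFindType] at h
  | cons u ts ih =>
    rw [pvFindType] at h
    by_cases hsw : PySem.Str.startswith s u = true
    · rw [if_pos hsw] at h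
      obtain rfl : u = t := Option.some.inj h
      exact ⟨List.mem_cons_self, hsw⟩
    · rw [if_neg hsw] at h
      obtain ⟨hmem, hs⟩ := ih h
      exact ⟨List.mem_cons_of_mem u hmem, hs⟩

-- no allowed type is a proper prefix of another
lemma pv_types_nonprefix : ∀ t ∈ pvAllowedTypes, ∀ u ∈ pvAllowedTypes,
    t ≠ u → ¬ (t.toList <+: u.toList) := by decide

lemma pv_strip_bool_str (x : String) : (!(PySem.Str.strip x == "")) = true ↔ pvNS x.toList := by
  rw [Bool.not_eq_eq_eq_not, Bool.not_true, beq_eq_false_iff_ne, ne_eq]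
  rw [show (PySem.Str.strip x = "") ↔ (PySem.Chars.strip x.toList = []) from
    ⟨fun h => by rw [← PySem.Str.toList_strip, h]; rfl,
     fun h => String.toList_eq_nil_iff.mp (by rw [PySem.Str.toList_strip]; exact h)⟩]
  rw [pv_strip_eq_nil_iff]
  unfold pvNS
  push Not
  rfl

lemma pv_slice_drop (s : String) (a : Int) (h : 0 ≤ a) :
    (PySem.Str.slice s (some a) none).toList = s.toList.drop a.toNat := by
  rw [PySem.Str.toList_slice, PySem.Chars.slice_eq_listSlice, PySem.List.slice_from _ h]

lemma pv_scope_one (s p : String) (j : Int) (hj : 0 ≤ j) :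
    (PySem.Str.find s p != -1
        && !(PySem.Str.strip (PySem.Str.slice s (some (PySem.Str.find s p + j)) none) == "")) = true
      ↔ PySem.Chars.find s.toList p.toList ≠ -1 ∧
          pvNS (s.toList.drop ((PySem.Chars.find s.toList p.toList).toNat + j.toNat)) := by
  rw [Bool.and_eq_true_iff, bne_iff_ne, PySem.Str.find_eq, ne_eq]
  constructor
  · rintro ⟨hne, hstr⟩
    have h0 : 0 ≤ PySem.Chars.find s.toList p.toList := by
      have := PySem.Chars.neg_one_le_find s.toList p.toList
      omega
    rw [pv_strip_bool_str, pv_slice_drop _ _ (by omega)] at hstr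
    rw [show (PySem.Chars.find s.toList p.toList + j).toNat
        = (PySem.Chars.find s.toList p.toList).toNat + j.toNat from by omega] at hstr
    exact ⟨hne, hstr⟩
  · rintro ⟨hne, hns⟩
    have h0 : 0 ≤ PySem.Chars.find s.toList p.toList := by
      have := PySem.Chars.neg_one_le_find s.toList p.toList
      omega
    refine ⟨hne, ?_⟩
    rw [pv_strip_bool_str, pv_slice_drop _ _ (by omega)]
    rwa [show (PySem.Chars.find s.toList p.toList + j).toNat
        = (PySem.Chars.find s.toList p.toList).toNat + j.toNat from by omega]
lemma pv_scope_bool (s : String) :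
    ((PySem.Str.find s "): " != -1
        && !(PySem.Str.strip (PySem.Str.slice s (some (PySem.Str.find s "): " + 3)) none) == ""))
      || (PySem.Str.find s ")!: " != -1
        && !(PySem.Str.strip (PySem.Str.slice s (some (PySem.Str.find s ")!: " + 4)) none) == "")))
    = pvScanB s.toList := by
  rw [Bool.eq_iff_iff, Bool.or_eq_true_iff,
      pv_scope_one s "): " 3 (by norm_num), pv_scope_one s ")!: " 4 (by norm_num), pv_scan_iff]
  rw [show ("): ").toList = pvSep1 from rfl, show (")!: ").toList = pvSep2 from rfl,
      show ((3 : Int)).toNat = 3 from rfl, show ((4 : Int)).toNat = 4 from rfl,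
      pv_find_case, pv_find_case]
  unfold pvSW
  constructor
  · rintro (⟨k, h⟩ | ⟨k, h⟩)
    · exact ⟨k, Or.inl h⟩
    · exact ⟨k, Or.inr h⟩
  · rintro ⟨k, h | h⟩
    · exact Or.inl ⟨k, h⟩
    · exact Or.inr ⟨k, h⟩

lemma pvBody_eq_alt (t s : String) (hsw : PySem.Str.startswith s t = true) :
    pvBody t s =
      (let rest := PySem.Str.slice s (some (PySem.Str.len t)) none
       if PySem.Str.startswith rest ": " then
         !(PySem.Str.strip (PySem.Str.slice rest (some 2) none) == "")
       else if PySem.Str.startswith rest "(" then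
         pvScanB s.toList
       else false) := by
  obtain ⟨r, hr⟩ := (PySem.Chars.startswith_iff _ _).mp (by rw [← PySem.Str.startswith_eq]; exact hsw)
  have hlen : (PySem.Str.len t).toNat = t.toList.length := by
    rw [PySem.Str.len_eq]; exact Int.toNat_natCast _
  have hrest : (PySem.Str.slice s (some (PySem.Str.len t)) none).toList = r := by
    rw [pv_slice_drop _ _ (by rw [PySem.Str.len_eq]; exact Int.natCast_nonneg _), hlen, ← hr,
        List.drop_left]
  have hg1 : PySem.Str.startswith s (t ++ ": ")
      = PySem.Str.startswith (PySem.Str.slice s (some (PySem.Str.len t)) none) ": " := by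
    rw [PySem.Str.startswith_eq, PySem.Str.startswith_eq, hrest, String.toList_append,
        Bool.eq_iff_iff, PySem.Chars.startswith_iff, PySem.Chars.startswith_iff, ← hr]
    exact List.prefix_append_right_inj _
  have hg2 : PySem.Str.startswith s (t ++ "(")
      = PySem.Str.startswith (PySem.Str.slice s (some (PySem.Str.len t)) none) "(" := by
    rw [PySem.Str.startswith_eq, PySem.Str.startswith_eq, hrest, String.toList_append,
        Bool.eq_iff_iff, PySem.Chars.startswith_iff, PySem.Chars.startswith_iff, ← hr]
    exact List.prefix_append_right_inj _
  have hx : (!(PySem.Str.strip (PySem.Str.slice s (some (PySem.Str.len (t ++ ": "))) none) == ""))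
      = (!(PySem.Str.strip (PySem.Str.slice
            (PySem.Str.slice s (some (PySem.Str.len t)) none) (some 2) none) == "")) := by
    rw [Bool.eq_iff_iff, pv_strip_bool_str, pv_strip_bool_str,
        pv_slice_drop _ _ (by rw [PySem.Str.len_eq]; exact Int.natCast_nonneg _),
        pv_slice_drop _ _ (by norm_num), hrest,
        (by rw [PySem.Str.len_eq, String.toList_append, List.length_append, Int.toNat_natCast]; rfl :
            (PySem.Str.len (t ++ ": ")).toNat = t.toList.length + 2),
        show ((2 : Int)).toNat = 2 from rfl, ← hr, ← List.drop_drop, List.drop_left]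
  dsimp only
  unfold pvBody
  rw [hg1, hg2, hx, pv_scope_bool]
  by_cases h1 : PySem.Str.startswith (PySem.Str.slice s (some (PySem.Str.len t)) none) ": " = true
  · have h2 : PySem.Str.startswith (PySem.Str.slice s (some (PySem.Str.len t)) none) "(" = false := by
      cases hx2 : PySem.Str.startswith (PySem.Str.slice s (some (PySem.Str.len t)) none) "(" with
      | false => rfl
      | true =>
        exfalso
        have p1 : (": ").toList <+: r := by
          rw [← hrest]
          exact (PySem.Chars.startswith_iff _ _).mp (by rw [← PySem.Str.startswith_eq]; exact h1)
        have p2 : ("(").toList <+: r := by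
          rw [← hrest]
          exact (PySem.Chars.startswith_iff _ _).mp (by rw [← PySem.Str.startswith_eq]; exact hx2)
        obtain ⟨u1, e1⟩ := p1
        obtain ⟨u2, e2⟩ := p2
        rw [← e1] at e2
        simp at e2
    rw [h1, h2]
    simp
  · rw [Bool.not_eq_true] at h1
    rw [h1]
    cases hx2 : PySem.Str.startswith (PySem.Str.slice s (some (PySem.Str.len t)) none) "(" <;>
      simp

-- ===== VERDICT (by name: the statement is the Claim_ definition above) =====
theorem has_conventional_commit_header_py_spec : Claim_equal_has_conventional_commit_header_py := by
  intro s _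
  unfold Spec_has_conventional_commit_header_py
  unfold has_conventional_commit_header_py has_conventional_commit_header_py_alt
  cases hft : pvFindType pvAllowedTypes s with
  | none =>
    rw [pvLoopA_eq_any]
    exact List.any_eq_false.mpr fun t ht => by
      simp [pvBody_false t s (pvFindType_none _ _ hft t ht)]
  | some t =>
    obtain ⟨hmem, hswt⟩ := pvFindType_some _ _ _ hft
    rw [pvLoopA_eq_any]
    have hothers : ∀ u ∈ pvAllowedTypes, u ≠ t → pvBody u s = false := by
      intro u hu hne
      apply pvBody_false
      cases hx : PySem.Str.startswith s u with
      | false => rfl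
      | true =>
        exfalso
        have pu : u.toList <+: s.toList :=
          (PySem.Chars.startswith_iff _ _).mp (by rw [← PySem.Str.startswith_eq]; exact hx)
        have pt : t.toList <+: s.toList :=
          (PySem.Chars.startswith_iff _ _).mp (by rw [← PySem.Str.startswith_eq]; exact hswt)
        rcases List.prefix_or_prefix_of_prefix pu pt with h | h
        · exact pv_types_nonprefix u hu t hmem hne h
        · exact pv_types_nonprefix t hmem u hu (Ne.symm hne) h
    have hany : pvAllowedTypes.any (fun u => pvBody u s) = pvBody t s := by
      rw [Bool.eq_iff_iff, List.any_eq_true]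
      constructor
      · rintro ⟨u, hu, hb⟩
        by_cases he : u = t
        · exact he ▸ hb
        · rw [hothers u hu he] at hb
          exact absurd hb (by simp)
      · intro hb
        exact ⟨t, hmem, hb⟩
    rw [hany, pvBody_eq_alt t s hswt]
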